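-- pv_equiv track=rewrite | github.com/Team-Discipline/Coding-Test | leetcode.com/Design Add and Search Words Data Structure.py | run_with
-- ===== SOURCE A (Python) =====
-- class WordDictionary:
--
--     def __init__(self):
--         self.d = {}
--
--     def addWord(self, word: str) -> None:
--         self.d[word] = True
--
--     def search(self, word: str) -> bool:
--         ready = list(filter(lambda x: len(x) == len(word), self.d.keys()))
--         if not ready:
--             return False
--
--         valid_chars = []
--         for i, ch in enumerate(word):
--             if ch != '.':
--                 valid_chars.append(i)
--
--         if len(valid_chars) != len(word):
--             for can_index, candidate in enumerate(ready):
--                 for i, ch in enumerate(candidate):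
--                     if i not in valid_chars:
--                         ready[can_index] = ready[can_index][:i] + '.' + ready[can_index][i + 1:]
--
--         if word in ready:
--             return True
--         else:
--             return False
--
-- def run_with(commands: [str], inputs: [str]) -> [None | bool]:
--     res = []
--     s = WordDictionary()
--     for command, input_value in list(zip(commands, inputs)):
--         if command == 'WordDictionary':
--             res.append(None)
--         elif command == 'addWord':
--             s.addWord(input_value[0])
--             res.append(None)
--         elif command == 'search':
--             res.append(s.search(input_value[0]))
--     return res
-- ===== SOURCE B (Python) =====
-- def run_with(commands: [str], inputs: [str]) -> [None | bool]:
--     res = []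
--     buckets = {}  # length -> list of added words of that length (in order, duplicates kept)
--     for command, input_value in zip(commands, inputs):
--         if command == 'WordDictionary':
--             res.append(None)
--         elif command == 'addWord':
--             w = input_value[0]
--             buckets.setdefault(len(w), []).append(w)
--             res.append(None)
--         elif command == 'search':
--             w = input_value[0]
--             res.append(any(all(c == '.' or c == d for c, d in zip(w, cand))
--                            for cand in buckets.get(len(w), [])))
--     return res
-- ===== Notes on version B (the rewrite author's own statement) =====
-- stated objective: alternative
-- what changed: B replaces A's per-search scan over all stored dict keys (which rebuilds a '.'-masked copy of every same-length candidate by string slicing and then does a list membership test) with a length-indexed bucket dictionary filled at addWord time and a single any() pass over the one matching-length bucket doing direct per-character wildcard comparison with early exit.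
import Mathlib
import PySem

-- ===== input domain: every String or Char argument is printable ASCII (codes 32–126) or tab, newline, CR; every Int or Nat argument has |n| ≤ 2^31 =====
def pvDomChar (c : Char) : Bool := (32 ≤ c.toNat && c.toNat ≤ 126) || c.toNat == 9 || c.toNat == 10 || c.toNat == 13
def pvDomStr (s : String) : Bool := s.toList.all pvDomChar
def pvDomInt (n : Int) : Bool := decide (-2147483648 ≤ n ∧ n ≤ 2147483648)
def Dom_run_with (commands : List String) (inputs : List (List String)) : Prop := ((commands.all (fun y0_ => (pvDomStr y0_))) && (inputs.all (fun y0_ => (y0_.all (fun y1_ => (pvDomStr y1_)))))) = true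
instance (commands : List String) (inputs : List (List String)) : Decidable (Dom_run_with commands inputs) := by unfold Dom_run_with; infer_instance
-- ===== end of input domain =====

-- B replaces A's per-search scan of ALL stored dict keys (masking each same-length candidate
-- by string surgery, then a membership test) with a length-indexed bucket dictionary built at
-- add time and a direct per-character wildcard comparison over the one bucket (objective:
-- alternative). Return-value equivalence only (neither version mutates its arguments).

-- ===== PORT A =====
-- `valid_chars` loop of A.search
def pvValidChars (word : String) : List Int :=
  (PySem.List.enumerate word.toList).foldl
    (fun acc p => if p.2 ≠ '.' then acc ++ [p.1] else acc) []

-- body of A.search's outer masking loop (`for can_index, candidate in enumerate(ready): ...`)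
def pvMaskInner (valid_chars : List Int) (rd : List String) (p : Int × String) : List String :=
  (PySem.List.enumerate p.2.toList).foldl (fun rd q =>
    if q.1 ∉ valid_chars then
      let cur := PySem.List.pyGetD rd p.1 ""
      PySem.List.pySetD rd p.1 (String.ofList
        (PySem.List.slice cur.toList none (some q.1) ++ ['.'] ++
         PySem.List.slice cur.toList (some (q.1 + 1)) none))
    else rd) rd

-- WordDictionary.search of A: `d` holds the added words as dict keys.
def pvSearchA (d : PySem.Dict String Bool) (word : String) : Bool :=
  let ready := (PySem.Dict.keys d).filter (fun x => PySem.Str.len x == PySem.Str.len word)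
  if ready = [] then false
  else
    let valid_chars := pvValidChars word
    let ready2 :=
      if PySem.List.len valid_chars ≠ PySem.Str.len word then
        (PySem.List.enumerate ready).foldl (pvMaskInner valid_chars) ready
      else ready
    decide (word ∈ ready2)

def run_with (commands : List String) (inputs : List (List String)) : List (Option Bool) :=
  ((commands.zip inputs).foldl (fun (st : List (Option Bool) × PySem.Dict String Bool) p =>
    if p.1 = "WordDictionary" then (st.1 ++ [none], st.2)
    else if p.1 = "addWord" then (st.1 ++ [none], st.2.insert (PySem.List.pyGetD p.2 0 "") true)
    else if p.1 = "search" then (st.1 ++ [some (pvSearchA st.2 (PySem.List.pyGetD p.2 0 ""))], st.2)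
    else st) ([], PySem.Dict.empty)).1

-- ===== PORT B =====
def pvMatch (w cand : String) : Bool :=
  (w.toList.zip cand.toList).all (fun q => q.1 == '.' || q.1 == q.2)

def pvSearchB (b : PySem.Dict Int (List String)) (w : String) : Bool :=
  (b.getD (PySem.Str.len w) []).any (fun cand => pvMatch w cand)

def run_with_alt (commands : List String) (inputs : List (List String)) : List (Option Bool) :=
  ((commands.zip inputs).foldl (fun (st : List (Option Bool) × PySem.Dict Int (List String)) p =>
    if p.1 = "WordDictionary" then (st.1 ++ [none], st.2)
    else if p.1 = "addWord" then
      let w := PySem.List.pyGetD p.2 0 ""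
      (st.1 ++ [none], st.2.modify (PySem.Str.len w) [] (fun l => l ++ [w]))
    else if p.1 = "search" then (st.1 ++ [some (pvSearchB st.2 (PySem.List.pyGetD p.2 0 ""))], st.2)
    else st) ([], PySem.Dict.empty)).1

-- ===== PRECONDITION & SPEC =====
-- Pre_ excludes exactly the inputs where A raises IndexError: an 'addWord' or 'search'
-- command (within the zipped prefix) whose input list is empty (input_value[0] fails).
def Pre_run_with (commands : List String) (inputs : List (List String)) : Prop :=
  ∀ p ∈ commands.zip inputs, (p.1 = "addWord" ∨ p.1 = "search") → p.2 ≠ []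
instance (commands : List String) (inputs : List (List String)) : Decidable (Pre_run_with commands inputs) := by unfold Pre_run_with; infer_instance

def pvWitness_run_with : List String × List (List String) :=
  (["WordDictionary", "addWord", "search", "search", "search"],
   [[], ["ab"], ["a."], ["b."], ["ab"]])

def Spec_run_with (commands : List String) (inputs : List (List String)) (out : List (Option Bool)) : Prop := out = run_with_alt commands inputs
instance (commands : List String) (inputs : List (List String)) (out : List (Option Bool)) : Decidable (Spec_run_with commands inputs out) := by unfold Spec_run_with; infer_instance

-- ===== CLAIM (what is proved, stated in full; the proofs are below) =====
def Claim_equal_run_with : Prop := ∀ (commands : List String) (inputs : List (List String)), Dom_run_with commands inputs → Pre_run_with commands inputs → Spec_run_with commands inputs (run_with commands inputs)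

-- ===== LEMMAS AND PROOFS =====

-- The list of added words after processing a prefix, as a pure value.
def pvDictA (ws : List String) : PySem.Dict String Bool :=
  ws.foldl (fun d w => d.insert w true) PySem.Dict.empty

def pvDictB (ws : List String) : PySem.Dict Int (List String) :=
  ws.foldl (fun b w => b.modify (PySem.Str.len w) [] (fun l => l ++ [w])) PySem.Dict.empty

-- A's dict keys are exactly the distinct added words, in first-insertion order.
lemma pvDictA_keys (ws : List String) : (pvDictA ws).keys = PySem.Set.ofList ws := by
  induction ws using List.reverseRecOn with
  | nil => rfl
  | append_singleton ws w ih =>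
    unfold pvDictA at *
    rw [List.foldl_append, PySem.Set.ofList_append_singleton, ← ih]
    simp only [List.foldl]
    by_cases h : (ws.foldl (fun d w => d.insert w true) PySem.Dict.empty).contains w = true
    · have hmem : w ∈ PySem.Set.ofList ws := by
        rw [← ih]; exact (PySem.Dict.contains_iff_mem_keys _ _).mp h
      rw [PySem.Dict.keys_insert_of_contains _ _ h, ih, PySem.Set.add_of_mem hmem]
    · have hmem : w ∉ PySem.Set.ofList ws := by
        rw [← ih]; intro hc
        exact h ((PySem.Dict.contains_iff_mem_keys _ _).mpr hc)
      rw [PySem.Dict.keys_insert_of_not_contains _ _ (by simpa using h), ih,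
        PySem.Set.add_of_not_mem hmem]

-- B's bucket for length L holds exactly the added words of length L, in order.
lemma pvDictB_getD (ws : List String) (L : Int) :
    (pvDictB ws).getD L [] = ws.filter (fun k => PySem.Str.len k == L) := by
  induction ws using List.reverseRecOn with
  | nil => rfl
  | append_singleton ws w ih =>
    unfold pvDictB at *
    rw [List.foldl_append]
    simp only [List.foldl]
    rw [PySem.Dict.getD_modify, List.filter_append]
    by_cases h : L = PySem.Str.len w
    · subst h
      rw [if_pos rfl, ih]
      simp [PySem.Str.len_eq]
    · rw [if_neg h, ih]
      have hf : ¬ (PySem.Str.len w = L) := Ne.symm h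
      simp [PySem.Str.len_eq] at hf ⊢
      simp [hf]

-- proof-side view of A's valid_chars loop
def pvValidL (wc : List Char) : List Int :=
  ((PySem.List.enumerate wc).filter (fun q => decide (q.2 ≠ '.'))).map Prod.fst

-- one masking step, on a string resp. its character list
def pvStepS (valid : List Int) (s : String) (q : Int × Char) : String :=
  if q.1 ∉ valid then
    String.ofList (PySem.List.slice s.toList none (some q.1) ++ ['.'] ++
      PySem.List.slice s.toList (some (q.1 + 1)) none)
  else s

def pvStepC (valid : List Int) (s : List Char) (q : Int × Char) : List Char :=
  if q.1 ∉ valid then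
    PySem.List.slice s none (some q.1) ++ ['.'] ++ PySem.List.slice s (some (q.1 + 1)) none
  else s

-- the masked copy of one candidate, as A's inner loop computes it
def pvMaskF (valid : List Int) (cand : String) : String :=
  (PySem.List.enumerate cand.toList).foldl (pvStepS valid) cand

lemma pvValidChars_eq (word : String) : pvValidChars word = pvValidL word.toList := by
  unfold pvValidChars pvValidL
  rw [PySem.List.foldl_append_ite (fun q => q.2 ≠ '.') Prod.fst]
  rfl

lemma mem_enum {A : Type} (cs : List A) (s : Int) (p : Int × A) :
    p ∈ PySem.List.enumerate cs s ↔ ∃ n : Nat, p.1 = s + n ∧ cs[n]? = some p.2 := by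
  induction cs generalizing s with
  | nil =>
    constructor
    · intro h; exact absurd h (by intro hc; cases hc)
    · rintro ⟨n, _, h2⟩; simp at h2
  | cons c cs ih =>
    rw [PySem.List.enumerate_cons]
    simp only [List.mem_cons, ih]
    constructor
    · rintro (rfl | ⟨n, h1, h2⟩)
      · exact ⟨0, by simp, by simp⟩
      · exact ⟨n + 1, by push_cast at h1 ⊢; omega, by simpa using h2⟩
    · rintro ⟨n, h1, h2⟩
      cases n with
      | zero =>
        left
        simp only [List.getElem?_cons_zero, Option.some_inj] at h2
        simp only [Nat.cast_zero, add_zero] at h1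
        obtain ⟨p1, p2⟩ := p
        simp_all
      | succ n =>
        right
        exact ⟨n, by push_cast at h1 ⊢; omega, by simpa using h2⟩

lemma mem_pvValidL (wc : List Char) (i : Int) :
    i ∈ pvValidL wc ↔ ∃ n : Nat, i = (n : Int) ∧ ∃ c, wc[n]? = some c ∧ c ≠ '.' := by
  unfold pvValidL
  simp only [List.mem_map, List.mem_filter]
  constructor
  · rintro ⟨q, ⟨hmem, hnd⟩, rfl⟩
    obtain ⟨n, h1, h2⟩ := (mem_enum wc 0 q).mp hmem
    exact ⟨n, by omega, q.2, h2, by simpa using hnd⟩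
  · rintro ⟨n, rfl, c, hc, hnd⟩
    exact ⟨((n : Int), c), ⟨(mem_enum wc 0 _).mpr ⟨n, by simp, by simpa using hc⟩,
      by simpa using hnd⟩, rfl⟩

lemma mem_pvValidL_natCast (wc : List Char) (n : Nat) :
    ((n : Int) ∈ pvValidL wc) ↔ ∃ c, wc[n]? = some c ∧ c ≠ '.' := by
  rw [mem_pvValidL]
  constructor
  · rintro ⟨m, hm, hc⟩
    have : n = m := by exact_mod_cast hm
    subst this; exact hc
  · intro h; exact ⟨n, rfl, h⟩

lemma countP_enum (cs : List Char) : ∀ s : Int,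
    (PySem.List.enumerate cs s).countP (fun q => decide (q.2 ≠ '.'))
      = cs.countP (fun c => decide (c ≠ '.')) := by
  induction cs with
  | nil => intro s; rfl
  | cons c cs ih =>
    intro s
    rw [PySem.List.enumerate_cons, List.countP_cons, List.countP_cons, ih (s + 1)]

lemma length_pvValidL (wc : List Char) :
    (pvValidL wc).length = wc.countP (fun c => decide (c ≠ '.')) := by
  unfold pvValidL
  rw [List.length_map, ← List.countP_eq_length_filter]
  exact countP_enum wc 0

-- A's "word has no dot" test
lemma noDot_iff (word : String) :
    ¬ (PySem.List.len (pvValidL word.toList) ≠ PySem.Str.len word)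
      ↔ ∀ c ∈ word.toList, c ≠ '.' := by
  rw [PySem.List.len_eq, PySem.Str.len_eq, not_ne_iff]
  rw [show ((pvValidL word.toList).length : Int) = (word.toList.length : Int)
      ↔ (pvValidL word.toList).length = word.toList.length from Nat.cast_inj]
  rw [length_pvValidL, List.countP_eq_length]
  simp

lemma foldl_setpoint {B : Type} (P : B → Prop) [DecidablePred P] (g : String → B → String)
    (k : Nat) : ∀ (l : List B) (rd : List String), k < rd.length →
    l.foldl (fun rd q => if P q then rd.set k (g (rd.getD k "") q) else rd) rd
      = rd.set k (l.foldl (fun s q => if P q then g s q else s) (rd.getD k "")) := by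
  intro l
  induction l with
  | nil =>
    intro rd hk
    simp only [List.foldl_nil]
    rw [List.getD_eq_getElem _ _ hk, List.set_getElem_self]
  | cons q l ih =>
    intro rd hk
    simp only [List.foldl_cons]
    by_cases hP : P q
    · rw [if_pos hP, if_pos hP, ih _ (by simpa using hk)]
      have hx : (rd.set k (g (rd.getD k "") q)).getD k "" = g (rd.getD k "") q := by
        rw [List.getD_eq_getElem _ _ (by simpa using hk)]
        exact List.getElem_set_self (by simpa using hk)
      rw [hx, List.set_set]
    · rw [if_neg hP, if_neg hP, ih _ hk]

lemma foldS_toList (valid : List Int) (l : List (Int × Char)) (s : String) :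
    (l.foldl (pvStepS valid) s).toList = l.foldl (pvStepC valid) s.toList := by
  rw [← List.foldl_hom String.toList (g₁ := pvStepS valid) (g₂ := pvStepC valid)]
  intro x y
  unfold pvStepS pvStepC
  split_ifs <;> simp

lemma innerC (valid : List Int) (cs : List Char) : ∀ (k : Nat) (s : List Char),
    k + cs.length ≤ s.length → ∀ n : Nat,
    ((PySem.List.enumerate cs (k : Int)).foldl (pvStepC valid) s)[n]? =
      if k ≤ n ∧ n < k + cs.length ∧ ((n : Int) ∉ valid) then some '.' else s[n]? := by
  induction cs with
  | nil =>
    intro k s _ n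
    rw [show PySem.List.enumerate ([] : List Char) (k : Int) = [] from rfl]
    simp only [List.foldl_nil]
    rw [if_neg (by rintro ⟨h1, h2, _⟩; simp only [List.length_nil] at h2; omega)]
  | cons c cs ih =>
    intro k s hlen n
    have hks : k < s.length := by simp only [List.length_cons] at hlen; omega
    rw [PySem.List.enumerate_cons, List.foldl_cons]
    have hstep : pvStepC valid s ((k : Int), c)
        = if (k : Int) ∉ valid then s.set k '.' else s := by
      show (if (k : Int) ∉ valid then
          PySem.List.slice s none (some (k : Int)) ++ ['.'] ++
            PySem.List.slice s (some ((k : Int) + 1)) none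
        else s) = _
      split_ifs with h
      · rfl
      · rw [PySem.List.slice_to_natCast,
          show ((k : Int) + 1) = ((k + 1 : Nat) : Int) by push_cast; ring,
          PySem.List.slice_from_natCast, List.set_eq_take_cons_drop '.' hks]
        simp
    rw [hstep, show ((k : Int) + 1) = ((k + 1 : Nat) : Int) by push_cast; ring]
    by_cases hv : (k : Int) ∉ valid
    · have hlen2 : k + 1 + cs.length ≤ (s.set k '.').length := by
        simp only [List.length_set]; simp only [List.length_cons] at hlen; omega
      rw [if_pos hv, ih (k + 1) _ hlen2 n, List.getElem?_set]
      by_cases hnk : k = n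
      · subst hnk
        rw [if_neg (by rintro ⟨h1, _, _⟩; omega), if_pos rfl, if_pos hks,
          if_pos ⟨le_refl k, by simp only [List.length_cons]; omega, hv⟩]
      · rw [if_neg hnk]
        by_cases hC : k + 1 ≤ n ∧ n < k + 1 + cs.length ∧ ((n : Int) ∉ valid)
        · rw [if_pos hC, if_pos ⟨by omega, by simp only [List.length_cons]; omega, hC.2.2⟩]
        · rw [if_neg hC, if_neg (by
            rintro ⟨h1, h2, h3⟩
            simp only [List.length_cons] at h2
            exact hC ⟨by omega, by omega, h3⟩)]
    · have hlen2 : k + 1 + cs.length ≤ s.length := by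
        simp only [List.length_cons] at hlen; omega
      rw [if_neg hv, ih (k + 1) s hlen2 n]
      rw [not_not] at hv
      by_cases hC : k + 1 ≤ n ∧ n < k + 1 + cs.length ∧ ((n : Int) ∉ valid)
      · rw [if_pos hC, if_pos ⟨by omega, by simp only [List.length_cons]; omega, hC.2.2⟩]
      · rw [if_neg hC, if_neg (by
          rintro ⟨h1, h2, h3⟩
          simp only [List.length_cons] at h2
          refine hC ⟨?_, by omega, h3⟩
          rcases Nat.eq_or_lt_of_le h1 with h | h
          · exact absurd (h ▸ hv) h3
          · omega)]

lemma set_append_mid (pre : List String) (x v : String) (rest : List String) :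
    (pre ++ x :: rest).set pre.length v = pre ++ v :: rest := by
  induction pre with
  | nil => rfl
  | cons a pre ih => simp [ih]

lemma maskInner_step (valid : List Int) (pre : List String) (cand : String)
    (rest : List String) :
    pvMaskInner valid (pre ++ cand :: rest) ((pre.length : Int), cand)
      = pre ++ pvMaskF valid cand :: rest := by
  unfold pvMaskInner
  simp only [PySem.List.pyGetD_natCast, PySem.List.pySetD_natCast]
  rw [foldl_setpoint (fun q : Int × Char => q.1 ∉ valid)
    (fun s q => String.ofList (PySem.List.slice s.toList none (some q.1) ++ ['.'] ++
      PySem.List.slice s.toList (some (q.1 + 1)) none))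
    pre.length (PySem.List.enumerate cand.toList) (pre ++ cand :: rest)
    (by simp)]
  have hget : (pre ++ cand :: rest).getD pre.length "" = cand := by
    rw [List.getD_eq_getElem _ _ (by simp)]
    simp
  rw [hget, set_append_mid]
  rfl

lemma outerL (valid : List Int) : ∀ (lst pre : List String),
    (PySem.List.enumerate lst (pre.length : Int)).foldl (pvMaskInner valid) (pre ++ lst)
      = pre ++ lst.map (pvMaskF valid) := by
  intro lst
  induction lst with
  | nil => intro pre; simp
  | cons cand rest ih =>
    intro pre
    rw [PySem.List.enumerate_cons, List.foldl_cons, maskInner_step]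
    rw [show pre ++ pvMaskF valid cand :: rest = (pre ++ [pvMaskF valid cand]) ++ rest by simp]
    rw [show ((pre.length : Int) + 1) = (((pre ++ [pvMaskF valid cand]).length : Nat) : Int) by
      simp]
    rw [ih (pre ++ [pvMaskF valid cand])]
    simp

lemma ready2_eq_map (valid : List Int) (ready : List String) :
    (PySem.List.enumerate ready).foldl (pvMaskInner valid) ready
      = ready.map (pvMaskF valid) := by
  have := outerL valid ready []
  simpa using this

lemma maskF_getElem? (valid : List Int) (cand : String) (n : Nat) :
    (pvMaskF valid cand).toList[n]? =
      if n < cand.toList.length ∧ ((n : Int) ∉ valid) then some '.' else cand.toList[n]? := by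
  unfold pvMaskF
  rw [foldS_toList]
  have h := innerC valid cand.toList 0 cand.toList (by omega) n
  rw [show ((0 : Nat) : Int) = 0 by simp] at h
  rw [h]
  by_cases hC : n < cand.toList.length ∧ ((n : Int) ∉ valid)
  · rw [if_pos ⟨by omega, by omega, hC.2⟩, if_pos hC]
  · rw [if_neg (by rintro ⟨_, h2, h3⟩; exact hC ⟨by omega, h3⟩), if_neg hC]

-- pvMatch as a positional statement (equal-length strings)
lemma pvMatch_iff (w cand : String) (hl : cand.toList.length = w.toList.length) :
    pvMatch w cand = true ↔
      ∀ n : Nat, n < w.toList.length →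
        (w.toList[n]? = some '.' ∨ cand.toList[n]? = w.toList[n]?) := by
  unfold pvMatch
  rw [List.all_eq_true]
  constructor
  · intro h n hn
    have hz : (w.toList[n]'hn, cand.toList[n]'(by omega)) ∈ w.toList.zip cand.toList := by
      rw [List.mem_iff_getElem]
      refine ⟨n, by rw [List.length_zip]; omega, ?_⟩
      rw [List.getElem_zip]
    have h2 := h _ hz
    simp only [Bool.or_eq_true, beq_iff_eq] at h2
    rcases h2 with h' | h'
    · left; rw [List.getElem?_eq_getElem hn, h']
    · right; rw [List.getElem?_eq_getElem hn, List.getElem?_eq_getElem (by omega : n < cand.toList.length), h']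
  · intro h q hq
    rw [List.mem_iff_getElem] at hq
    obtain ⟨n, hn, hq⟩ := hq
    rw [List.getElem_zip] at hq
    have hn' : n < w.toList.length := by rw [List.length_zip] at hn; omega
    have h2 := h n hn'
    rw [List.getElem?_eq_getElem hn', List.getElem?_eq_getElem (by omega : n < cand.toList.length)] at h2
    subst hq
    simp only [Bool.or_eq_true, beq_iff_eq]
    rcases h2 with h' | h'
    · left; exact Option.some_inj.mp h'
    · right; exact (Option.some_inj.mp h').symm

-- membership of a position in valid_chars, as a statement about the word
lemma mem_valid_iff (w : String) (n : Nat) (hn : n < w.toList.length) :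
    ((n : Int) ∈ pvValidL w.toList) ↔ ¬ (w.toList[n]? = some '.') := by
  rw [mem_pvValidL_natCast, List.getElem?_eq_getElem hn]
  constructor
  · rintro ⟨c, hc, hne⟩ heq
    rw [Option.some_inj] at hc heq
    exact hne (hc ▸ heq)
  · intro hne
    exact ⟨w.toList[n], rfl, fun h => hne (by rw [h])⟩

-- core of the dotted branch: the masked candidate equals the word iff pvMatch holds
lemma maskF_eq_iff (w cand : String) (hl : cand.toList.length = w.toList.length) :
    pvMaskF (pvValidL w.toList) cand = w ↔ pvMatch w cand = true := by
  rw [pvMatch_iff w cand hl]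
  constructor
  · intro h n hn
    have he : (pvMaskF (pvValidL w.toList) cand).toList[n]? = w.toList[n]? := by rw [h]
    rw [maskF_getElem?] at he
    by_cases hd : w.toList[n]? = some '.'
    · exact Or.inl hd
    · right
      rw [if_neg (by rintro ⟨_, hnv⟩; exact hnv ((mem_valid_iff w n hn).mpr hd))] at he
      exact he
  · intro h
    apply String.toList_inj.mp
    apply List.ext_getElem?
    intro n
    rw [maskF_getElem?]
    by_cases hn : n < w.toList.length
    · rcases h n hn with hd | hc
      · rw [if_pos ⟨by omega, fun hm => ((mem_valid_iff w n hn).mp hm) hd⟩, hd]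
      · by_cases hd : w.toList[n]? = some '.'
        · rw [if_pos ⟨by omega, fun hm => ((mem_valid_iff w n hn).mp hm) hd⟩, hd]
        · rw [if_neg (by rintro ⟨_, hnv⟩; exact hnv ((mem_valid_iff w n hn).mpr hd))]
          exact hc
    · rw [if_neg (by rintro ⟨h1, _⟩; omega),
        List.getElem?_eq_none_iff.mpr (by omega),
        List.getElem?_eq_none_iff.mpr (by omega)]

-- core of the dotless branch
lemma dotless_match (w cand : String) (hl : cand.toList.length = w.toList.length)
    (hnd : ∀ c ∈ w.toList, c ≠ '.') :
    pvMatch w cand = true ↔ cand = w := by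
  rw [pvMatch_iff w cand hl]
  constructor
  · intro h
    apply String.toList_inj.mp
    apply List.ext_getElem?
    intro n
    by_cases hn : n < w.toList.length
    · rcases h n hn with hd | hc
      · exact absurd (List.mem_of_getElem? hd) (by simpa using hnd '.')
      · exact hc
    · rw [List.getElem?_eq_none_iff.mpr (by omega),
        List.getElem?_eq_none_iff.mpr (by omega)]
  · rintro rfl n hn; right; rfl

-- the per-search equivalence-- the per-search equivalence
lemma search_eq (ws : List String) (w : String) :
    pvSearchA (pvDictA ws) w = pvSearchB (pvDictB ws) w := by
  unfold pvSearchB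
  rw [pvDictB_getD, List.any_filter]
  simp only [pvSearchA]
  rw [pvDictA_keys, pvValidChars_eq]
  set rdy := (PySem.Set.ofList ws).filter (fun x => PySem.Str.len x == PySem.Str.len w) with hrdy
  have hlenmem : ∀ cand ∈ rdy, cand.toList.length = w.toList.length := by
    intro cand hc
    rw [hrdy, List.mem_filter] at hc
    have h2 := hc.2
    rw [beq_iff_eq, PySem.Str.len_eq, PySem.Str.len_eq] at h2
    exact_mod_cast h2
  have hany : ws.any (fun k => (PySem.Str.len k == PySem.Str.len w) && pvMatch w k)
      = rdy.any (fun cand => pvMatch w cand) := by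
    rw [hrdy, List.any_filter, Bool.eq_iff_iff, List.any_eq_true, List.any_eq_true]
    constructor <;> rintro ⟨x, hx, hg⟩
    · exact ⟨x, (PySem.Set.mem_ofList ws x).mpr hx, hg⟩
    · exact ⟨x, (PySem.Set.mem_ofList ws x).mp hx, hg⟩
  rw [hany]
  by_cases h0 : rdy = []
  · rw [if_pos h0, h0]; rfl
  · rw [if_neg h0]
    by_cases hdot : PySem.List.len (pvValidL w.toList) ≠ PySem.Str.len w
    · rw [if_pos hdot, ready2_eq_map]
      rw [Bool.eq_iff_iff, decide_eq_true_iff, List.any_eq_true]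
      constructor
      · intro hm
        obtain ⟨cand, hc, heq⟩ := List.mem_map.mp hm
        exact ⟨cand, hc, (maskF_eq_iff w cand (hlenmem cand hc)).mp heq⟩
      · rintro ⟨cand, hc, hm⟩
        exact List.mem_map.mpr ⟨cand, hc, (maskF_eq_iff w cand (hlenmem cand hc)).mpr hm⟩
    · rw [if_neg hdot]
      have hnd := (noDot_iff w).mp hdot
      rw [Bool.eq_iff_iff, decide_eq_true_iff, List.any_eq_true]
      constructor
      · intro hw; exact ⟨w, hw, (dotless_match w w rfl hnd).mpr rfl⟩
      · rintro ⟨cand, hc, hm⟩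
        exact (dotless_match w cand (hlenmem cand hc) hnd).mp hm ▸ hc

-- main loop equivalence
lemma loop_eq (l : List (String × List String)) (ws : List String) (res : List (Option Bool)) :
    (l.foldl (fun (st : List (Option Bool) × PySem.Dict String Bool) p =>
      if p.1 = "WordDictionary" then (st.1 ++ [none], st.2)
      else if p.1 = "addWord" then (st.1 ++ [none], st.2.insert (PySem.List.pyGetD p.2 0 "") true)
      else if p.1 = "search" then (st.1 ++ [some (pvSearchA st.2 (PySem.List.pyGetD p.2 0 ""))], st.2)
      else st) (res, pvDictA ws)).1 =
    (l.foldl (fun (st : List (Option Bool) × PySem.Dict Int (List String)) p =>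
      if p.1 = "WordDictionary" then (st.1 ++ [none], st.2)
      else if p.1 = "addWord" then
        let w := PySem.List.pyGetD p.2 0 ""
        (st.1 ++ [none], st.2.modify (PySem.Str.len w) [] (fun l => l ++ [w]))
      else if p.1 = "search" then (st.1 ++ [some (pvSearchB st.2 (PySem.List.pyGetD p.2 0 ""))], st.2)
      else st) (res, pvDictB ws)).1 := by
  induction l generalizing ws res with
  | nil => rfl
  | cons p l ih =>
    simp only [List.foldl_cons]
    by_cases h1 : p.1 = "WordDictionary"
    · simp only [h1, if_true]; exact ih ws (res ++ [none])
    · by_cases h2 : p.1 = "addWord"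
      · simp only [h2, if_true]
        have hA : (pvDictA ws).insert (PySem.List.pyGetD p.2 0 "") true
            = pvDictA (ws ++ [PySem.List.pyGetD p.2 0 ""]) := by
          unfold pvDictA; rw [List.foldl_append]; rfl
        have hB : (pvDictB ws).modify (PySem.Str.len (PySem.List.pyGetD p.2 0 "")) []
              (fun l => l ++ [PySem.List.pyGetD p.2 0 ""])
            = pvDictB (ws ++ [PySem.List.pyGetD p.2 0 ""]) := by
          unfold pvDictB; rw [List.foldl_append]; rfl
        rw [hA, hB]; exact ih _ (res ++ [none])
      · by_cases h3 : p.1 = "search"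
        · simp only [h3, if_true]
          rw [search_eq ws (PySem.List.pyGetD p.2 0 "")]
          exact ih ws _
        · simp only [if_neg h1, if_neg h2, if_neg h3]; exact ih ws res

-- ===== VERDICT (by name: the statement is the Claim_ definition above) =====
theorem run_with_spec : Claim_equal_run_with := by
  intro commands inputs _ _
  unfold Spec_run_with run_with run_with_alt
  exact loop_eq (commands.zip inputs) [] []
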